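-- pv_equiv track=rewrite | github.com/glavie/Task1 | Task1.py | update
-- ===== SOURCE A (Python) =====
-- def update(config, service_name, count):
--     """Update config with new instances."""
--     new_config = {key: dict(value) for key, value in config.items()}
--     for _ in range(count):
--         m_key, m_val = min(
--             new_config.items(),
--             key=lambda item: (sum(item[1].values()), item[0]),
--         )
--         m_val.setdefault(service_name, 0)
--         m_val[service_name] += 1
--     return new_config
-- ===== SOURCE B (Python) =====
-- def update(config, service_name, count):
--     """Update config with new instances."""
--     result = {key: dict(value) for key, value in config.items()}
--     if count > 0:
--         # Water-filling: compute the final common level directly instead of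
--         # assigning the `count` instances one at a time.
--         entries = sorted((sum(v.values()), k) for k, v in result.items())
--         n = len(entries)
--         remaining = count
--         level = entries[0][0]
--         i = 1  # entries[:i] are the keys poured up to `level`
--         while i < n and remaining >= i * (entries[i][0] - level):
--             remaining -= i * (entries[i][0] - level)
--             level = entries[i][0]
--             i += 1
--         level += remaining // i
--         r = remaining % i
--         # the r leftover instances go to the r smallest keys at the final level
--         extra = set(sorted(k for _, k in entries[:i])[:r])
--         for load, key in entries[:i]:
--             add = level - load + (1 if key in extra else 0)
--             if add:
--                 v = result[key]
--                 v[service_name] = v.get(service_name, 0) + add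
--     return result
-- ===== Notes on version B (the rewrite author's own statement) =====
-- stated objective: faster
-- what changed: B replaces A's per-instance greedy loop (re-summing every node's load to find the minimum, count times) by a water-filling computation: sort the (load, key) pairs once, find the final common load level and the remainder arithmetically, and patch each inner dict once; the cost no longer depends on count.
-- outside the precondition, e.g. on update({}, 's', 1): A raises ValueError, B raises IndexError
import Mathlib
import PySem

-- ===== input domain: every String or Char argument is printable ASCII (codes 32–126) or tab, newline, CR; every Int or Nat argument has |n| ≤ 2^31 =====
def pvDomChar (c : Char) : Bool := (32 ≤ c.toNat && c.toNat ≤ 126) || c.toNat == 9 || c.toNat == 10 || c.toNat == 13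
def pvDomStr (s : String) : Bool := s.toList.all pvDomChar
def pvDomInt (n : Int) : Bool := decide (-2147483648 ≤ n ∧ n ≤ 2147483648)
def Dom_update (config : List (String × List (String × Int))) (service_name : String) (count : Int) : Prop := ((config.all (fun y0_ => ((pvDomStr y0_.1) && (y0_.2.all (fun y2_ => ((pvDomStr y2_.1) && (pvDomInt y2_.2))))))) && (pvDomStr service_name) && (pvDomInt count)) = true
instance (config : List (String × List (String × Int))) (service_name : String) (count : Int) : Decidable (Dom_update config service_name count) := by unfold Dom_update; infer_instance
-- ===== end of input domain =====

-- B replaces A's one-instance-at-a-time greedy loop by a water-filling computation of the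
-- final load level (sort once, pour in bulk), so its cost no longer grows with `count`.

-- ===== PORT A =====
-- shared decoding: the dict arguments arrive as association lists; Python's dict keeps the
-- first position / last value of a repeated key, which is PySem.Dict.ofList
def pvToDict (config : List (String × List (String × Int))) : PySem.Dict String (PySem.Dict String Int) :=
  PySem.Dict.ofList (config.map (fun p => (p.1, PySem.Dict.ofList p.2)))

def pvSumVals (v : PySem.Dict String Int) : Int := v.values.sum

-- one iteration of A's loop: min over items by (sum(values), key), setdefault, += 1
-- (Python mutates m_val in place; inserting at the existing key keeps its position)
def pvStepA (service_name : String) (nc : PySem.Dict String (PySem.Dict String Int)) :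
    PySem.Dict String (PySem.Dict String Int) :=
  match PySem.List.min2? nc.items (fun p => pvSumVals p.2) (fun p => p.1) with
  | none => nc      -- Python: min() raises ValueError here; excluded by Pre_update
  | some m => nc.insert m.1 ((m.2.setdefault service_name 0).modify service_name 0 (· + 1))

def update (config : List (String × List (String × Int))) (service_name : String) (count : Int) :
    List (String × List (String × Int)) :=
  -- new_config = {key: dict(value) for key, value in config.items()}, then the loop, then return
  ((PySem.List.pyRange 0 count 1).foldl (fun nc _ => pvStepA service_name nc)
      (pvToDict config)).items.map (fun p => (p.1, p.2.items))

-- ===== PORT B =====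
-- Source B's while loop: advance `level` to the next sorted load while the budget suffices
def pvWhileB (rest : List (Int × String)) (i : Nat) (level remaining : Int) :
    Nat × Int × Int :=
  match rest with
  | [] => (i, level, remaining)
  | e :: rest' =>
    if (i : Int) * (e.1 - level) ≤ remaining then
      pvWhileB rest' (i + 1) e.1 (remaining - (i : Int) * (e.1 - level))
    else (i, level, remaining)

-- Source B's final for loop body: patch one entry's dict with its computed `add`
def pvPatchB (service_name : String) (level : Int) (extra : PySem.Set String)
    (d : PySem.Dict String (PySem.Dict String Int)) (q : Int × String) :
    PySem.Dict String (PySem.Dict String Int) :=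
  let add := level - q.1 + (if PySem.Set.contains extra q.2 then 1 else 0)
  if add ≠ 0 then
    match d.get? q.2 with
    | some v => d.insert q.2 (v.insert service_name (v.getD service_name 0 + add))
    | none => d       -- unreachable: q.2 is a key of d (result[key] cannot raise)
  else d

def update_alt (config : List (String × List (String × Int))) (service_name : String) (count : Int) :
    List (String × List (String × Int)) :=
  let result := pvToDict config
  let result :=
    if count > 0 then
      let entries := PySem.List.sorted2 (result.items.map (fun p => (pvSumVals p.2, p.1)))
        (fun q => q.1) (fun q => q.2)
      match entries with
      | [] => result    -- Python: entries[0][0] raises IndexError here; excluded by Pre_update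
      | e0 :: tl =>
        let t := pvWhileB tl 1 e0.1 count
        let i := t.1
        let level := t.2.1 + PySem.Int.floordiv t.2.2 (i : Int)
        let r := PySem.Int.mod t.2.2 (i : Int)
        let extra := PySem.Set.ofList (PySem.List.slice
          (PySem.List.sorted ((entries.take i).map (fun q => q.2)) (fun k => k)) none (some r))
        (entries.take i).foldl (pvPatchB service_name level extra) result
    else result
  result.items.map (fun p => (p.1, p.2.items))

-- ===== PRECONDITION & SPEC =====
-- Pre_ excludes only count > 0 with an empty config, where both Pythons raise (A: ValueError
-- from min() of an empty sequence; B: IndexError on entries[0])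
def Pre_update (config : List (String × List (String × Int))) (service_name : String) (count : Int) : Prop :=
  config ≠ [] ∨ count ≤ 0
instance (config : List (String × List (String × Int))) (service_name : String) (count : Int) : Decidable (Pre_update config service_name count) := by unfold Pre_update; infer_instance
def pvWitness_update : (List (String × List (String × Int))) × String × Int := ([("a", [("x", 1)])], "svc", 2)
def Spec_update (config : List (String × List (String × Int))) (service_name : String) (count : Int) (out : List (String × List (String × Int))) : Prop := out = update_alt config service_name count
instance (config : List (String × List (String × Int))) (service_name : String) (count : Int) (out : List (String × List (String × Int))) : Decidable (Spec_update config service_name count out) := by unfold Spec_update; infer_instance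

-- ===== CLAIM (what is proved, stated in full; the proofs are below) =====
def Claim_equal_update : Prop := ∀ (config : List (String × List (String × Int))) (service_name : String) (count : Int), Dom_update config service_name count → Pre_update config service_name count → Spec_update config service_name count (update config service_name count)

-- ===== LEMMAS AND PROOFS =====

-- abstraction shared by both sides: e k = number of instances key k has received so far,
-- the config dict with each inner dict patched by e is pvStA
def pvPatch (s : String) (v : PySem.Dict String Int) (e : Int) : PySem.Dict String Int :=
  if e = 0 then v else v.insert s (v.getD s 0 + e)

def pvIncr (s : String) (w : PySem.Dict String Int) : PySem.Dict String Int :=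
  (w.setdefault s 0).modify s 0 (· + 1)

def pvStA (s : String) (M : List (String × PySem.Dict String Int)) (e : String → Int) :
    PySem.Dict String (PySem.Dict String Int) :=
  PySem.Dict.mk (M.map (fun p => (p.1, pvPatch s p.2 (e p.1))))

def pvPick (M : List (String × PySem.Dict String Int)) (e : String → Int) :
    Option (String × PySem.Dict String Int) :=
  PySem.List.min2? M (fun p => pvSumVals p.2 + e p.1) (fun p => p.1)

def pvNext (M : List (String × PySem.Dict String Int)) (e : String → Int) : String → Int :=
  match pvPick M e with
  | none => e
  | some pm => fun k => if k = pm.1 then e k + 1 else e k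

-- the water-filling quantities over the load list P = items with summed values
def qmP (P : List (String × Int)) (L : Int) : Nat :=
  (P.filter (fun q => decide (q.2 ≤ L))).length

def qNeed (P : List (String × Int)) (L : Int) : Int :=
  (P.map (fun q => max 0 (L - q.2))).sum

def qSK (P : List (String × Int)) (L : Int) : List String :=
  PySem.List.sorted ((P.filter (fun q => decide (q.2 ≤ L))).map Prod.fst) (fun k => k)

def qW (P : List (String × Int)) (L : Int) (r : Nat) : String → Int := fun k =>
  match P.find? (fun q => q.1 == k) with
  | some q => if q.2 ≤ L then L - q.2 + (if k ∈ (qSK P L).take r then 1 else 0) else 0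
  | none => 0

def qMinL (P : List (String × Int)) : Int :=
  match P with
  | [] => 0
  | q :: t => (t.map (fun p => p.2)).foldl min q.2

def qLR (P : List (String × Int)) : Nat → Int × Nat
  | 0 => (qMinL P, 0)
  | c + 1 =>
    let lr := qLR P c
    if lr.2 + 1 < qmP P lr.1 then (lr.1, lr.2 + 1) else (lr.1 + 1, 0)

-- generic min2? facts

theorem pvMin2Aux_congr {α κ₁ κ₂ : Type} [LT κ₁] [DecidableLT κ₁] [LT κ₂] [DecidableLT κ₂]
    (k1 k1' : α → κ₁) (k2 k2' : α → κ₂) :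
    ∀ (L : List α) (acc : Option α),
    (∀ x ∈ L, k1 x = k1' x ∧ k2 x = k2' x) →
    (∀ m, acc = some m → k1 m = k1' m ∧ k2 m = k2' m) →
    List.foldl (fun acc x => match acc with
      | none => some x
      | some m => if (decide (k1 x < k1 m) || !decide (k1 m < k1 x) && decide (k2 x < k2 m)) = true then some x else some m) acc L
    = List.foldl (fun acc x => match acc with
      | none => some x
      | some m => if (decide (k1' x < k1' m) || !decide (k1' m < k1' x) && decide (k2' x < k2' m)) = true then some x else some m) acc L := by
  intro L
  induction L with
  | nil => intro acc _ _; rfl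
  | cons x t IH =>
    intro acc h hm
    have hx := h x (by simp)
    simp only [List.foldl_cons]
    cases acc with
    | none =>
      exact IH (some x) (fun y hy => h y (by simp [hy])) (fun m hm' => by cases hm'; exact hx)
    | some m =>
      have hmm := hm m rfl
      dsimp only
      rw [show (if (decide (k1 x < k1 m) || !decide (k1 m < k1 x) && decide (k2 x < k2 m)) = true then some x else some m)
            = (if (decide (k1' x < k1' m) || !decide (k1' m < k1' x) && decide (k2' x < k2' m)) = true then some x else some m) by
          rw [hx.1, hx.2, hmm.1, hmm.2]]
      split
      · exact IH (some x) (fun y hy => h y (by simp [hy])) (fun m' hm' => by cases hm'; exact hx)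
      · exact IH (some m) (fun y hy => h y (by simp [hy])) (fun m' hm' => by cases hm'; exact hmm)

theorem pvMin2_congr {α κ₁ κ₂ : Type} [LT κ₁] [DecidableLT κ₁] [LT κ₂] [DecidableLT κ₂]
    (L : List α) (k1 k1' : α → κ₁) (k2 k2' : α → κ₂)
    (h : ∀ x ∈ L, k1 x = k1' x ∧ k2 x = k2' x) :
    PySem.List.min2? L k1 k2 = PySem.List.min2? L k1' k2' := by
  exact pvMin2Aux_congr k1 k1' k2 k2' L none h (by intro m hm; cases hm)

theorem pvMin2Aux_map {α β κ₁ κ₂ : Type} [LT κ₁] [DecidableLT κ₁] [LT κ₂] [DecidableLT κ₂]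
    (f : α → β) (k1 : β → κ₁) (k2 : β → κ₂) :
    ∀ (L : List α) (acc : Option α),
    List.foldl (fun acc x => match acc with
      | none => some x
      | some m => if (decide (k1 x < k1 m) || !decide (k1 m < k1 x) && decide (k2 x < k2 m)) = true then some x else some m) (Option.map f acc) (L.map f)
    = Option.map f (List.foldl (fun acc x => match acc with
      | none => some x
      | some m => if (decide (k1 (f x) < k1 (f m)) || !decide (k1 (f m) < k1 (f x)) && decide (k2 (f x) < k2 (f m))) = true then some x else some m) acc L) := by
  intro L
  induction L with
  | nil => intro acc; rfl
  | cons x t IH =>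
    intro acc
    simp only [List.map_cons, List.foldl_cons]
    cases acc with
    | none => exact IH (some x)
    | some m =>
      simp only [Option.map_some]
      split
      · exact IH (some x)
      · exact IH (some m)

theorem pvMin2_map {α β κ₁ κ₂ : Type} [LT κ₁] [DecidableLT κ₁] [LT κ₂] [DecidableLT κ₂]
    (L : List α) (f : α → β) (k1 : β → κ₁) (k2 : β → κ₂) :
    PySem.List.min2? (L.map f) k1 k2 = Option.map f (PySem.List.min2? L (fun a => k1 (f a)) (fun a => k2 (f a))) := by
  exact pvMin2Aux_map f k1 k2 L none

-- min2? returns the unique strict lexicographic minimum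
theorem pvMin2Aux_strict {α : Type} (k1 : α → Int) (k2 : α → String) (x : α) :
    ∀ (L : List α) (acc : Option α),
    (∀ y ∈ L, y = x ∨ k1 x < k1 y ∨ (k1 x = k1 y ∧ k2 x < k2 y)) →
    ((x ∈ L ∧ ∀ a, acc = some a → (a = x ∨ k1 x < k1 a ∨ (k1 x = k1 a ∧ k2 x < k2 a))) ∨ acc = some x) →
    List.foldl (fun acc y => match acc with
      | none => some y
      | some m => if (decide (k1 y < k1 m) || !decide (k1 m < k1 y) && decide (k2 y < k2 m)) = true then some y else some m) acc L = some x := by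
  intro L
  induction L with
  | nil =>
    intro acc _ hacc
    rcases hacc with ⟨hx, _⟩ | h
    · cases hx
    · exact h
  | cons y t IH =>
    intro acc hdom hacc
    have hy := hdom y (by simp)
    have hdomt : ∀ z ∈ t, z = x ∨ k1 x < k1 z ∨ (k1 x = k1 z ∧ k2 x < k2 z) :=
      fun z hz => hdom z (by simp [hz])
    have keepx : ∀ z, (k1 x < k1 z ∨ (k1 x = k1 z ∧ k2 x < k2 z)) →
        (decide (k1 z < k1 x) || !decide (k1 x < k1 z) && decide (k2 z < k2 x)) = false := by
      intro z hz
      rcases hz with h1 | ⟨h1, h2⟩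
      · simp [not_lt_of_gt h1, h1]
      · simp [h1, not_lt_of_gt h2]
    simp only [List.foldl_cons]
    cases acc with
    | none =>
      dsimp only
      rcases hy with hy | hy
      · rw [hy]
        exact IH (some x) hdomt (Or.inr rfl)
      · rcases hacc with ⟨hx, _⟩ | h
        · have hxt : x ∈ t := by
            rcases List.mem_cons.mp hx with h' | h'
            · exfalso
              subst h'
              rcases hy with h1 | ⟨_, h2⟩
              · exact lt_irrefl _ h1
              · exact lt_irrefl _ h2
            · exact h'
          exact IH (some y) hdomt (Or.inl ⟨hxt, fun a ha => by cases ha; exact Or.inr hy⟩)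
        · cases h
    | some a =>
      dsimp only
      rcases hacc with ⟨hx, hdoma⟩ | h
      · rcases hdoma a rfl with ha | ha
        · subst ha
          rcases hy with hy | hy
          · rw [hy]
            split <;> exact IH (some a) hdomt (Or.inr rfl)
          · rw [keepx y hy]
            simp only [Bool.false_eq_true, if_false]
            exact IH (some a) hdomt (Or.inr rfl)
        · rcases hy with hy | hy
          · rw [hy]
            have hwin : (decide (k1 x < k1 a) || !decide (k1 a < k1 x) && decide (k2 x < k2 a)) = true := by
              rcases ha with h1 | ⟨h1, h2⟩
              · simp [h1]
              · simp [h1, h2]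
            rw [hwin]
            simp only [if_true]
            exact IH (some x) hdomt (Or.inr rfl)
          · have hxt : x ∈ t := by
              rcases List.mem_cons.mp hx with h' | h'
              · exfalso
                subst h'
                rcases hy with h1 | ⟨_, h2⟩
                · exact lt_irrefl _ h1
                · exact lt_irrefl _ h2
              · exact h'
            split
            · exact IH (some y) hdomt (Or.inl ⟨hxt, fun b hb => by cases hb; exact Or.inr hy⟩)
            · exact IH (some a) hdomt (Or.inl ⟨hxt, fun b hb => by cases hb; exact Or.inr ha⟩)
      · cases h
        rcases hy with hy | hy
        · rw [hy]
          split <;> exact IH (some x) hdomt (Or.inr rfl)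
        · rw [keepx y hy]
          simp only [Bool.false_eq_true, if_false]
          exact IH (some x) hdomt (Or.inr rfl)

theorem pvMin2_eq_of_strict {α : Type} (L : List α) (k1 : α → Int) (k2 : α → String) (x : α)
    (hx : x ∈ L) (h : ∀ y ∈ L, y = x ∨ k1 x < k1 y ∨ (k1 x = k1 y ∧ k2 x < k2 y)) :
    PySem.List.min2? L k1 k2 = some x := by
  exact pvMin2Aux_strict k1 k2 x L none h (Or.inl ⟨hx, by intro a ha; cases ha⟩)

theorem pvMin2Aux_mem {α κ₁ κ₂ : Type} [LT κ₁] [DecidableLT κ₁] [LT κ₂] [DecidableLT κ₂]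
    (k1 : α → κ₁) (k2 : α → κ₂) :
    ∀ (L : List α) (acc : Option α) (m : α),
    List.foldl (fun acc x => match acc with
      | none => some x
      | some m => if (decide (k1 x < k1 m) || !decide (k1 m < k1 x) && decide (k2 x < k2 m)) = true then some x else some m) acc L = some m
    → m ∈ L ∨ acc = some m := by
  intro L
  induction L with
  | nil => intro acc m h; right; exact h
  | cons x t IH =>
    intro acc m h
    simp only [List.foldl_cons] at h
    cases acc with
    | none =>
      rcases IH (some x) m h with h' | h'
      · exact Or.inl (by simp [h'])
      · cases h'; exact Or.inl (by simp)
    | some m0 =>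
      dsimp only at h
      revert h
      split
      · intro h
        rcases IH (some x) m h with h' | h'
        · exact Or.inl (by simp [h'])
        · cases h'; exact Or.inl (by simp)
      · intro h
        rcases IH (some m0) m h with h' | h'
        · exact Or.inl (by simp [h'])
        · exact Or.inr h'

theorem pvMin2_mem {α κ₁ κ₂ : Type} [LT κ₁] [DecidableLT κ₁] [LT κ₂] [DecidableLT κ₂]
    (L : List α) (k1 : α → κ₁) (k2 : α → κ₂) (m : α)
    (h : PySem.List.min2? L k1 k2 = some m) : m ∈ L := by
  rcases pvMin2Aux_mem k1 k2 L none m h with h' | h'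
  · exact h'
  · cases h'

theorem pvEqOfKey {ν : Type} (M : List (String × ν)) (hnd : (M.map Prod.fst).Nodup)
    (p q : String × ν) (hp : p ∈ M) (hq : q ∈ M) (h : p.1 = q.1) : p = q := by
  induction M with
  | nil => cases hp
  | cons a t IH =>
    rw [List.map_cons, List.nodup_cons] at hnd
    rcases List.mem_cons.mp hp with hp | hp
    · rcases List.mem_cons.mp hq with hq | hq
      · rw [hp, hq]
      · exfalso
        apply hnd.1
        have hq1 : q.1 ∈ t.map Prod.fst := List.mem_map_of_mem hq
        rw [← hp, h]; exact hq1
    · rcases List.mem_cons.mp hq with hq | hq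
      · exfalso
        apply hnd.1
        have hp1 : p.1 ∈ t.map Prod.fst := List.mem_map_of_mem hp
        rw [← hq, ← h]; exact hp1
      · exact IH hnd.2 hp hq

theorem pvFindSelf {ν : Type} (P : List (String × ν)) (hnd : (P.map Prod.fst).Nodup)
    (q : String × ν) (hq : q ∈ P) : P.find? (fun p => p.1 == q.1) = some q := by
  induction P with
  | nil => cases hq
  | cons a t IH =>
    rw [List.map_cons, List.nodup_cons] at hnd
    rcases List.mem_cons.mp hq with hq' | hq'
    · subst hq'; simp [List.find?]
    · have hne : a.1 ≠ q.1 := by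
        intro h
        exact hnd.1 (h ▸ List.mem_map_of_mem hq')
      rw [List.find?_cons_of_neg (by simpa using hne)]
      exact IH hnd.2 hq'

theorem pvMemUpdate {κ ν : Type} [BEq κ] [LawfulBEq κ] (l : List (κ × ν)) (d : PySem.Dict κ ν)
    (p : κ × ν) (hp : p ∈ (d.update l).items) : p ∈ d.items ∨ p ∈ l := by
  induction l generalizing d with
  | nil => exact Or.inl hp
  | cons a t IH =>
    have : d.update (a :: t) = (d.insert a.1 a.2).update t := rfl
    rw [this] at hp
    rcases IH (d.insert a.1 a.2) hp with h | h
    · rw [PySem.Dict.mem_items_insert] at h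
      rcases h with h | h
      · right; simp [h]
      · exact Or.inl h.1
    · right; right; exact h

theorem pvSumReplace (l : List (String × Int)) (s : String) (x c : Int)
    (hnd : (l.map Prod.fst).Nodup) (hm : (s, c) ∈ l) :
    ((l.map (fun p => if p.1 == s then (s, x) else p)).map Prod.snd).sum
      = (l.map Prod.snd).sum - c + x := by
  induction l with
  | nil => cases hm
  | cons a t IH =>
    rw [List.map_cons, List.nodup_cons] at hnd
    rcases List.mem_cons.mp hm with hm | hm
    · have ha : a = (s, c) := hm.symm
      subst ha
      have ht : t.map (fun p => if p.1 == s then (s, x) else p) = t := by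
        conv_rhs => rw [← List.map_id t]
        apply List.map_congr_left
        intro p hp
        have : p.1 ≠ s := fun hps => hnd.1 (List.mem_map.mpr ⟨p, hp, hps⟩)
        simp [this]
      simp only [List.map_cons]
      rw [if_pos (by simp), ht]
      simp only [List.sum_cons]
      ring
    · have hs : s ∈ t.map Prod.fst := List.mem_map.mpr ⟨(s, c), hm, rfl⟩
      have has : a.1 ≠ s := fun h => hnd.1 (h ▸ hs)
      simp only [List.map_cons, List.sum_cons]
      rw [if_neg (by simpa using has), IH hnd.2 hm]
      ring

theorem pvSumInsert (v : PySem.Dict String Int) (s : String) (x : Int) (hnd : v.keys.Nodup) :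
    pvSumVals (v.insert s x)
      = pvSumVals v + x - (if v.contains s then v.getD s 0 else 0) := by
  by_cases hc : v.contains s
  · rw [if_pos hc]
    have hget : (v.get? s).isSome := by rw [← PySem.Dict.contains_eq_isSome_get?]; exact hc
    obtain ⟨c, hcv⟩ := Option.isSome_iff_exists.mp hget
    have hmem := PySem.Dict.mem_items_of_get?_eq_some v hcv
    have hgd : v.getD s 0 = c := PySem.Dict.getD_of_get?_eq_some v 0 hcv
    have hit := PySem.Dict.items_insert_of_contains v x hc
    simp only [pvSumVals, PySem.Dict.values, hit, hgd]
    have := pvSumReplace v.items s x c (by simpa [PySem.Dict.keys] using hnd) hmem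
    rw [this]; ring
  · rw [if_neg hc]
    have hit := PySem.Dict.items_insert_of_not_contains v x (by simpa using hc)
    simp [pvSumVals, PySem.Dict.values, hit]

theorem pvSumPatch (s : String) (v : PySem.Dict String Int) (e : Int) (hnd : v.keys.Nodup) :
    pvSumVals (pvPatch s v e) = pvSumVals v + e := by
  unfold pvPatch
  by_cases he : e = 0
  · simp [he]
  · rw [if_neg he, pvSumInsert v s _ hnd]
    by_cases hc : v.contains s
    · rw [if_pos hc]; ring
    · rw [if_neg hc, PySem.Dict.getD_of_not_contains v 0 (by simpa using hc)]; ring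

theorem pvIncrPatch (s : String) (v : PySem.Dict String Int) (e : Int) (he : 0 ≤ e) :
    pvIncr s (pvPatch s v e) = pvPatch s v (e + 1) := by
  by_cases he0 : e = 0
  · subst he0
    have h1 : pvPatch s v 0 = v := by simp [pvPatch]
    have h2 : pvPatch s v (0 + 1) = v.insert s (v.getD s 0 + 1) := by norm_num [pvPatch]
    rw [h1, h2]
    unfold pvIncr
    by_cases hc : v.contains s
    · rw [PySem.Dict.setdefault_of_contains v 0 hc, PySem.Dict.modify]
    · rw [PySem.Dict.setdefault_of_not_contains v 0 (by simpa using hc), PySem.Dict.modify,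
        PySem.Dict.getD_insert_self, PySem.Dict.insert_insert_self,
        PySem.Dict.getD_of_not_contains v 0 (by simpa using hc)]
  · have h1 : pvPatch s v e = v.insert s (v.getD s 0 + e) := by
      simp only [pvPatch]; rw [if_neg he0]
    have h2 : pvPatch s v (e + 1) = v.insert s (v.getD s 0 + (e + 1)) := by
      simp only [pvPatch]; rw [if_neg (by omega)]
    rw [h1, h2]
    unfold pvIncr
    rw [PySem.Dict.setdefault_of_contains _ 0 (PySem.Dict.contains_insert_self _ _ _),
      PySem.Dict.modify, PySem.Dict.getD_insert_self, PySem.Dict.insert_insert_self,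
      show v.getD s 0 + e + 1 = v.getD s 0 + (e + 1) by ring]

-- inserting at a key of M into a dict of shape mk (M.map (key, f)) rewrites that key's value
theorem pvInsertMk {α ν : Type} (M : List (String × α)) (f : String × α → ν) (pm : String × α)
    (hpm : pm ∈ M) (w : ν) :
    (PySem.Dict.mk (M.map (fun p => (p.1, f p)))).insert pm.1 w
      = PySem.Dict.mk (M.map (fun p => (p.1, if p.1 = pm.1 then w else f p))) := by
  apply PySem.Dict.ext
  have hcont : (PySem.Dict.mk (M.map (fun p => (p.1, f p)))).contains pm.1 = true := by
    rw [PySem.Dict.contains_iff_mem_keys]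
    show pm.1 ∈ (M.map (fun p => (p.1, f p))).map (fun p => p.1)
    rw [List.map_map]
    exact List.mem_map.mpr ⟨pm, hpm, rfl⟩
  rw [PySem.Dict.items_insert_of_contains _ w hcont]
  show (M.map (fun p => (p.1, f p))).map _ = _
  rw [List.map_map]
  apply List.map_congr_left
  intro p _
  by_cases hk : p.1 = pm.1
  · simp only [Function.comp_apply, beq_iff_eq, hk, if_true]
  · simp only [Function.comp_apply, beq_iff_eq, hk, if_false]

theorem pvStA_congr (s : String) (M : List (String × PySem.Dict String Int)) (e e' : String → Int)
    (h : ∀ p ∈ M, e p.1 = e' p.1) : pvStA s M e = pvStA s M e' := by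
  unfold pvStA
  congr 1
  apply List.map_congr_left
  intro p hp
  rw [h p hp]

theorem pvStepA_eq (s : String) (M : List (String × PySem.Dict String Int)) (e : String → Int)
    (HK : (M.map Prod.fst).Nodup) (HV : ∀ p ∈ M, p.2.keys.Nodup) (He : ∀ k, 0 ≤ e k) :
    pvStepA s (pvStA s M e) = pvStA s M (pvNext M e) := by
  have hmin : PySem.List.min2? (pvStA s M e).items (fun p => pvSumVals p.2) (fun p => p.1)
      = Option.map (fun p : String × PySem.Dict String Int => (p.1, pvPatch s p.2 (e p.1))) (pvPick M e) := by
    show PySem.List.min2? (M.map (fun p => (p.1, pvPatch s p.2 (e p.1)))) _ _ = _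
    rw [pvMin2_map]
    congr 1
    apply pvMin2_congr
    intro p hp
    exact ⟨pvSumPatch s p.2 (e p.1) (HV p hp), rfl⟩
  unfold pvStepA pvNext
  rw [hmin]
  cases hp : pvPick M e with
  | none => rfl
  | some pm =>
    dsimp only [Option.map_some]
    have hpm : pm ∈ M := pvMin2_mem M _ _ pm hp
    rw [show (((pvPatch s pm.2 (e pm.1)).setdefault s 0).modify s 0 (· + 1))
          = pvPatch s pm.2 (e pm.1 + 1) from pvIncrPatch s pm.2 (e pm.1) (He pm.1)]
    rw [show pvStA s M e = PySem.Dict.mk (M.map (fun p => (p.1, pvPatch s p.2 (e p.1)))) from rfl]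
    rw [pvInsertMk M (fun p => pvPatch s p.2 (e p.1)) pm hpm (pvPatch s pm.2 (e pm.1 + 1))]
    apply PySem.Dict.ext
    show _ = M.map _
    apply List.map_congr_left
    intro p hpM
    by_cases hk : p.1 = pm.1
    · have hpq : p = pm := pvEqOfKey M HK p pm hpM hpm hk
      subst hpq
      dsimp only
      rw [if_pos rfl, if_pos rfl]
    · dsimp only
      rw [if_neg hk, if_neg hk]

-- arithmetic of the water level
theorem qNeed_succ (P : List (String × Int)) (L : Int) :
    qNeed P (L + 1) = qNeed P L + (qmP P L : Int) := by
  unfold qNeed qmP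
  rw [show (P.map (fun q => max 0 (L + 1 - q.2)))
        = P.map (fun q => max 0 (L - q.2) + (if decide (q.2 ≤ L) = true then 1 else 0)) by
      apply List.map_congr_left
      intro q _
      by_cases h : q.2 ≤ L
      · simp [h]; omega
      · simp [h]; omega]
  rw [PySem.List.sum_map_add_int, PySem.List.sum_map_ite_one_zero, List.countP_eq_length_filter]

theorem qmP_nonneg_mem (P : List (String × Int)) (L : Int) (q : String × Int)
    (hq : q ∈ P) (hle : q.2 ≤ L) : 0 < qmP P L := by
  unfold qmP
  have : q ∈ P.filter (fun q => decide (q.2 ≤ L)) := List.mem_filter.mpr ⟨hq, by simpa using hle⟩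
  exact List.length_pos_of_mem this

theorem qNeed_mono (P : List (String × Int)) (L L' : Int) (h : L ≤ L') :
    qNeed P L ≤ qNeed P L' := by
  have H : ∀ n : Nat, qNeed P L ≤ qNeed P (L + n) := by
    intro n
    induction n with
    | zero => simp
    | succ n IH =>
      have he : L + ((n + 1 : Nat) : Int) = (L + n) + 1 := by push_cast; ring
      rw [he, qNeed_succ]
      have : (0 : Int) ≤ (qmP P (L + n) : Int) := Int.natCast_nonneg _
      omega
  have he : L' = L + ((L' - L).toNat : Int) := by omega
  rw [he]; exact H _

theorem qUniq (P : List (String × Int)) (L L' : Int) (r r' : Nat)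
    (hr : r < qmP P L) (hr' : r' < qmP P L')
    (h : qNeed P L + (r : Int) = qNeed P L' + (r' : Int)) : L = L' ∧ r = r' := by
  have key : ∀ (A B : Int) (u u' : Nat), u < qmP P A → A < B →
      qNeed P A + (u : Int) < qNeed P B + (u' : Int) := by
    intro A B u u' hu hAB
    have h1 : qNeed P (A + 1) ≤ qNeed P B := qNeed_mono P (A + 1) B (by omega)
    have h2 : qNeed P (A + 1) = qNeed P A + (qmP P A : Int) := qNeed_succ P A
    have : (u : Int) < (qmP P A : Int) := by exact_mod_cast hu
    have : (0 : Int) ≤ (u' : Int) := Int.natCast_nonneg _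
    omega
  rcases lt_trichotomy L L' with hLL | hLL | hLL
  · exact absurd h (by have := key L L' r r' hr hLL; omega)
  · subst hLL
    constructor
    · rfl
    · have : (r : Int) = (r' : Int) := by omega
      exact_mod_cast this
  · exact absurd h (by have := key L' L r' r hr' hLL; omega)

-- the sorted keys at or below level L
theorem qSK_length (P : List (String × Int)) (L : Int) : (qSK P L).length = qmP P L := by
  unfold qSK qmP
  rw [PySem.List.length_sorted, List.length_map]

theorem qSK_mem (P : List (String × Int)) (L : Int) (k : String) :
    k ∈ qSK P L ↔ ∃ q ∈ P, q.1 = k ∧ q.2 ≤ L := by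
  unfold qSK
  rw [PySem.List.mem_sorted]
  constructor
  · intro h
    obtain ⟨q, hq, hk⟩ := List.mem_map.mp h
    have := List.mem_filter.mp hq
    exact ⟨q, this.1, hk, by simpa using this.2⟩
  · intro ⟨q, hq, hk, hle⟩
    exact List.mem_map.mpr ⟨q, List.mem_filter.mpr ⟨hq, by simpa using hle⟩, hk⟩

theorem qSK_nodup (P : List (String × Int)) (L : Int) (hK : (P.map Prod.fst).Nodup) :
    (qSK P L).Nodup := by
  unfold qSK
  apply (PySem.List.sorted_perm _ _ _).nodup_iff.mpr
  exact hK.sublist (List.Sublist.map Prod.fst List.filter_sublist)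

theorem qSK_pairwise_lt (P : List (String × Int)) (L : Int) (hK : (P.map Prod.fst).Nodup) :
    (qSK P L).Pairwise (· < ·) := by
  have h1 : (qSK P L).Pairwise (· ≤ ·) := PySem.List.sorted_pairwise _ _
  have h2 : (qSK P L).Nodup := qSK_nodup P L hK
  exact (h1.and h2).imp (fun h => lt_of_le_of_ne h.1 h.2)

theorem qW_nonneg (P : List (String × Int)) (L : Int) (r : Nat) (k : String) :
    0 ≤ qW P L r k := by
  unfold qW
  cases P.find? (fun q => q.1 == k) with
  | none => exact le_refl 0
  | some q =>
    dsimp only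
    split
    · split <;> omega
    · exact le_refl 0

theorem qW_val (P : List (String × Int)) (hK : (P.map Prod.fst).Nodup) (L : Int) (r : Nat)
    (q : String × Int) (hq : q ∈ P) :
    qW P L r q.1 = if q.2 ≤ L then L - q.2 + (if q.1 ∈ (qSK P L).take r then 1 else 0) else 0 := by
  unfold qW
  rw [pvFindSelf P hK q hq]

-- the element of the sorted key list at position r is not among the first r keys
theorem qSK_getElem_not_take (P : List (String × Int)) (L : Int) (hK : (P.map Prod.fst).Nodup)
    (r : Nat) (hr : r < (qSK P L).length) : (qSK P L)[r] ∉ (qSK P L).take r := by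
  intro hmem
  obtain ⟨j, hj, hjv⟩ := List.getElem_of_mem hmem
  have hjr : j < r := lt_of_lt_of_le hj (by simpa using List.length_take_le r (qSK P L))
  have hj' : j < (qSK P L).length := lt_trans hjr hr
  rw [List.getElem_take] at hjv
  have := (List.Nodup.getElem_inj_iff (qSK_nodup P L hK)).mp hjv
  omega

theorem pvMemTake {α : Type} (l : List α) (j r : Nat) (hj : j < l.length) (h : j < r) :
    l[j] ∈ l.take r := by
  have hlt : j < (l.take r).length := by simp [List.length_take]; omega
  have he : (l.take r)[j] = l[j] := List.getElem_take
  rw [← he]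
  exact List.getElem_mem hlt

-- an element of qSK not among the first r keys and distinct from position r sits strictly later
theorem qSK_late_gt (P : List (String × Int)) (L : Int) (hK : (P.map Prod.fst).Nodup)
    (r : Nat) (hr : r < (qSK P L).length) (k : String) (hk : k ∈ qSK P L)
    (hnt : k ∉ (qSK P L).take r) (hne : k ≠ (qSK P L)[r]) : (qSK P L)[r] < k := by
  obtain ⟨j, hj, hjv⟩ := List.getElem_of_mem hk
  have hjr : r < j := by
    have h1 : ¬ j < r := fun h' => hnt (by rw [← hjv]; exact pvMemTake _ j r hj h')
    have h2 : j ≠ r := fun h' => hne (by subst h'; exact hjv.symm)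
    omega
  have := List.pairwise_iff_getElem.mp (qSK_pairwise_lt P L hK) r j hr hj hjr
  rwa [hjv] at this

theorem qStep (P : List (String × Int)) (hK : (P.map Prod.fst).Nodup) (L : Int) (r : Nat)
    (hr : r < qmP P L) :
    ∃ x ∈ P, PySem.List.min2? P (fun q => q.2 + qW P L r q.1) (fun q => q.1) = some x ∧
      ∀ q ∈ P, qW P (if r + 1 < qmP P L then L else L + 1) (if r + 1 < qmP P L then r + 1 else 0) q.1
        = qW P L r q.1 + (if q.1 = x.1 then 1 else 0) := by
  have hlen : (qSK P L).length = qmP P L := qSK_length P L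
  have hr' : r < (qSK P L).length := by omega
  set kr := (qSK P L)[r] with hkr
  have hkrmem : kr ∈ qSK P L := List.getElem_mem _
  obtain ⟨x, hxP, hxk, hxle⟩ := (qSK_mem P L kr).mp hkrmem
  have hxnt : x.1 ∉ (qSK P L).take r := by rw [hxk]; exact qSK_getElem_not_take P L hK r hr'
  have hxval : qW P L r x.1 = L - x.2 := by
    rw [qW_val P hK L r x hxP, if_pos hxle, if_neg hxnt]; ring
  have hk1x : x.2 + qW P L r x.1 = L := by rw [hxval]; ring
  refine ⟨x, hxP, ?_, ?_⟩
  · apply pvMin2_eq_of_strict P _ _ x hxP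
    intro y hy
    by_cases hyx : y = x
    · exact Or.inl hyx
    · right
      have hyk : y.1 ≠ x.1 := fun h => hyx (pvEqOfKey P hK y x hy hxP h)
      by_cases hy2 : y.2 ≤ L
      · have hymem : y.1 ∈ qSK P L := (qSK_mem P L y.1).mpr ⟨y, hy, rfl, hy2⟩
        by_cases hin : y.1 ∈ (qSK P L).take r
        · left
          rw [hk1x, qW_val P hK L r y hy, if_pos hy2, if_pos hin]
          omega
        · right
          constructor
          · rw [hk1x, qW_val P hK L r y hy, if_pos hy2, if_neg hin]
            omega
          · have hgt := qSK_late_gt P L hK r hr' y.1 hymem hin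
              (by rw [hxk, hkr] at hyk; exact hyk)
            rw [hxk, hkr]
            exact hgt
      · left
        rw [hk1x, qW_val P hK L r y hy, if_neg hy2]
        omega
  · intro q hq
    have hqx1 : q.1 = x.1 → q = x := fun h => pvEqOfKey P hK q x hq hxP h
    by_cases hcase : r + 1 < qmP P L
    · rw [if_pos hcase, if_pos hcase]
      have htake : ∀ k : String, k ∈ (qSK P L).take (r + 1) ↔ (k ∈ (qSK P L).take r ∨ k = kr) := by
        intro k
        rw [List.take_succ, List.getElem?_eq_getElem hr']
        simp only [Option.toList_some, List.mem_append, List.mem_singleton]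
        rw [hkr]
      rw [qW_val P hK L r q hq, qW_val P hK _ (r + 1) q hq]
      by_cases hq2 : q.2 ≤ L
      · rw [if_pos hq2, if_pos hq2]
        by_cases hqx : q.1 = x.1
        · have hqeq : q = x := hqx1 hqx
          subst hqeq
          rw [if_pos ((htake q.1).mpr (Or.inr hxk)), if_neg hxnt, if_pos rfl]
          ring
        · have : q.1 ∈ (qSK P L).take (r + 1) ↔ q.1 ∈ (qSK P L).take r := by
            rw [htake]
            constructor
            · rintro (h | h)
              · exact h
              · exact absurd (h.trans hxk.symm) hqx
            · exact Or.inl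
          rw [if_neg hqx]
          by_cases hin : q.1 ∈ (qSK P L).take r
          · rw [if_pos hin, if_pos (this.mpr hin)]; ring
          · rw [if_neg hin, if_neg (fun h => hin (this.mp h))]; ring
      · rw [if_neg hq2, if_neg hq2]
        rw [if_neg (fun h => hq2 (by rw [hqx1 h]; exact hxle))]
        ring
    · rw [if_neg hcase, if_neg hcase]
      have hm : r + 1 = qmP P L := by omega
      rw [qW_val P hK L r q hq, qW_val P hK (L + 1) 0 q hq]
      simp only [List.take_zero, List.not_mem_nil, if_false]
      by_cases hq2 : q.2 ≤ L
      · rw [if_pos (show q.2 ≤ L + 1 by omega), if_pos hq2]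
        by_cases hqx : q.1 = x.1
        · rw [if_pos hqx, if_neg (by rw [hqx]; exact hxnt)]
          ring
        · rw [if_neg hqx]
          have hqmem : q.1 ∈ qSK P L := (qSK_mem P L q.1).mpr ⟨q, hq, rfl, hq2⟩
          have hin : q.1 ∈ (qSK P L).take r := by
            by_contra hnt
            obtain ⟨j, hj, hjv⟩ := List.getElem_of_mem hqmem
            have hj1 : ¬ j < r := fun h' => hnt (by rw [← hjv]; exact pvMemTake _ j r hj h')
            have hj2 : j ≠ r := fun h' => hqx (by subst h'; exact (hxk.trans (hkr.trans hjv)).symm)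
            omega
          rw [if_pos hin]
          ring
      · rw [if_neg hq2, if_neg (show ¬ q.1 = x.1 from fun h => hq2 (by rw [hqx1 h]; exact hxle))]
        by_cases hq2' : q.2 ≤ L + 1
        · rw [if_pos hq2']
          omega
        · rw [if_neg hq2']
          omega

theorem qmP_mono (P : List (String × Int)) (L L' : Int) (h : L ≤ L') : qmP P L ≤ qmP P L' := by
  unfold qmP
  rw [← List.countP_eq_length_filter, ← List.countP_eq_length_filter]
  apply List.countP_mono_left
  intro x _ hx
  simp only [decide_eq_true_eq] at hx ⊢
  omega

theorem qMinL_le (P : List (String × Int)) (q : String × Int) (hq : q ∈ P) :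
    qMinL P ≤ q.2 := by
  match P, hq with
  | p :: t, hq =>
    unfold qMinL
    have h := PySem.List.foldl_min_le (t.map (fun p => p.2)) p.2
    rcases List.mem_cons.mp hq with h' | h'
    · rw [h']; exact h.1
    · exact h.2 q.2 (List.mem_map.mpr ⟨q, h', rfl⟩)

theorem qMinL_mem (P : List (String × Int)) (hne : P ≠ []) : ∃ q ∈ P, q.2 = qMinL P := by
  match P, hne with
  | p :: t, _ =>
    unfold qMinL
    rcases PySem.List.foldl_min_mem (t.map (fun p => p.2)) p.2 with h | h
    · exact ⟨p, by simp, h.symm⟩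
    · obtain ⟨q, hq, hqv⟩ := List.mem_map.mp h
      exact ⟨q, by simp [hq], hqv⟩

theorem qNeed_minL (P : List (String × Int)) : qNeed P (qMinL P) = 0 := by
  unfold qNeed
  apply List.sum_eq_zero
  intro x hx
  obtain ⟨q, hq, hqv⟩ := List.mem_map.mp hx
  have := qMinL_le P q hq
  omega

theorem qLR_spec (P : List (String × Int)) (hne : P ≠ []) (c : Nat) :
    (qLR P c).2 < qmP P (qLR P c).1 ∧ qNeed P (qLR P c).1 + ((qLR P c).2 : Int) = c := by
  induction c with
  | zero =>
    obtain ⟨q, hq, hqv⟩ := qMinL_mem P hne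
    exact ⟨qmP_nonneg_mem P (qMinL P) q hq (le_of_eq hqv), by simp [qLR, qNeed_minL]⟩
  | succ n IH =>
    have hdef : qLR P (n + 1) = (if (qLR P n).2 + 1 < qmP P (qLR P n).1
        then ((qLR P n).1, (qLR P n).2 + 1) else ((qLR P n).1 + 1, 0)) := by
      rw [qLR]
    rw [hdef]
    by_cases hc : (qLR P n).2 + 1 < qmP P (qLR P n).1
    · rw [if_pos hc]
      refine ⟨hc, ?_⟩
      have := IH.2
      push_cast
      omega
    · rw [if_neg hc]
      have hm : (qLR P n).2 + 1 = qmP P (qLR P n).1 := by omega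
      constructor
      · have h1 : qmP P (qLR P n).1 ≤ qmP P ((qLR P n).1 + 1) := qmP_mono P _ _ (by omega)
        have h0 := IH.1
        show ((0 : Nat) < qmP P ((qLR P n).1 + 1))
        omega
      · have h3 := IH.2
        show qNeed P ((qLR P n).1 + 1) + ((0 : Nat) : Int) = ((n + 1 : Nat) : Int)
        rw [qNeed_succ P (qLR P n).1]
        have h4 : ((qLR P n).2 : Int) + 1 = ((qmP P (qLR P n).1 : Nat) : Int) := by
          exact_mod_cast hm
        push_cast
        omega

theorem pvFoldlConst {α β : Type} (l : List β) (f : α → α) (init : α) :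
    l.foldl (fun d _ => f d) init = f^[l.length] init := by
  induction l generalizing init with
  | nil => rfl
  | cons x t IH =>
    rw [List.foldl_cons, List.length_cons, IH (f init)]
    exact (Function.iterate_succ_apply f t.length init).symm

-- A's greedy loop state after n steps is the water-filling allocation at step n
theorem qIterA (s : String) (M : List (String × PySem.Dict String Int))
    (HK : (M.map Prod.fst).Nodup) (HV : ∀ p ∈ M, p.2.keys.Nodup) (hne : M ≠ []) (n : Nat) :
    (pvStepA s)^[n] (PySem.Dict.mk M)
      = pvStA s M (qW (M.map (fun p => (p.1, pvSumVals p.2)))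
          (qLR (M.map (fun p => (p.1, pvSumVals p.2))) n).1
          (qLR (M.map (fun p => (p.1, pvSumVals p.2))) n).2) := by
  set P := M.map (fun p => (p.1, pvSumVals p.2)) with hP
  have hK' : (P.map Prod.fst).Nodup := by
    rw [hP, List.map_map]
    exact HK
  have hPne : P ≠ [] := by
    rw [hP]
    intro h
    exact hne (List.map_eq_nil_iff.mp h)
  induction n with
  | zero =>
    simp only [Function.iterate_zero, id_eq]
    unfold pvStA
    congr 1
    conv_lhs => rw [← List.map_id M]
    apply List.map_congr_left
    intro p hp
    have hq : (p.1, pvSumVals p.2) ∈ P := by rw [hP]; exact List.mem_map.mpr ⟨p, hp, rfl⟩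
    have hv := qW_val P hK' (qLR P 0).1 (qLR P 0).2 (p.1, pvSumVals p.2) hq
    have h0 : (qLR P 0) = (qMinL P, 0) := rfl
    have hz : qW P (qLR P 0).1 (qLR P 0).2 p.1 = 0 := by
      rw [hv, h0]
      simp only [List.take_zero, List.not_mem_nil, if_false]
      by_cases hle : pvSumVals p.2 ≤ qMinL P
      · rw [if_pos hle]
        have := qMinL_le P (p.1, pvSumVals p.2) hq
        simp only [] at this ⊢
        omega
      · rw [if_neg hle]
    rw [hz]
    simp [pvPatch]
  | succ n IH =>
    rw [Function.iterate_succ_apply', IH]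
    set L := (qLR P n).1 with hL
    set r := (qLR P n).2 with hrdef
    have hr : r < qmP P L := (qLR_spec P hPne n).1
    obtain ⟨x, hxP, hmin, hnext⟩ := qStep P hK' L r hr
    have he : ∀ k, 0 ≤ qW P L r k := qW_nonneg P L r
    rw [pvStepA_eq s M _ HK HV he]
    -- identify the picked element
    have hmap := pvMin2_map M (fun p => (p.1, pvSumVals p.2))
      (fun q : String × Int => q.2 + qW P L r q.1) (fun q : String × Int => q.1)
    have hmin' : Option.map (fun p : String × PySem.Dict String Int => (p.1, pvSumVals p.2))
        (PySem.List.min2? M (fun p => pvSumVals p.2 + qW P L r p.1) (fun p => p.1)) = some x := by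
      rw [← hmap]
      exact hmin
    obtain ⟨x', hx'eq, hx'img⟩ := Option.map_eq_some_iff.mp hmin'
    have hx'1 : x'.1 = x.1 := by rw [← hx'img]
    have hpick : pvPick M (qW P L r) = some x' := hx'eq
    have hdef : qLR P (n + 1) = (if r + 1 < qmP P L then (L, r + 1) else (L + 1, 0)) := by
      rw [qLR, ← hL, ← hrdef]
    apply (pvStA_congr s M _ _ ?_).trans ?_
    · exact qW P (qLR P (n+1)).1 (qLR P (n+1)).2
    · intro p hp
      unfold pvNext
      rw [hpick]
      have hq : (p.1, pvSumVals p.2) ∈ P := by rw [hP]; exact List.mem_map.mpr ⟨p, hp, rfl⟩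
      have := hnext (p.1, pvSumVals p.2) hq
      simp only [] at this
      rw [hdef]
      by_cases hc : r + 1 < qmP P L
      · simp only [if_pos hc] at this ⊢
        rw [this, hx'1]
        by_cases hk : p.1 = x.1
        · rw [if_pos hk, if_pos hk]
        · rw [if_neg hk, if_neg hk]
          ring
      · simp only [if_neg hc] at this ⊢
        rw [this, hx'1]
        by_cases hk : p.1 = x.1
        · rw [if_pos hk, if_pos hk]
        · rw [if_neg hk, if_neg hk]
          ring
    · rfl

-- Source B's sorted(...) on (load, key) tuples is sorting by the lexicographic key
theorem pvSorted2_eq_sorted (xs : List (Int × String)) :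
    PySem.List.sorted2 xs (fun q => q.1) (fun q => q.2)
      = PySem.List.sorted xs (fun q => toLex (q.1, q.2)) := by
  have hb : (fun (a b : Int × String) => decide (a.1 < b.1) || !decide (b.1 < a.1) && decide (a.2 < b.2))
      = (fun (a b : Int × String) => decide (toLex (a.1, a.2) < toLex (b.1, b.2))) := by
    funext a b
    rw [Bool.eq_iff_iff]
    simp only [Bool.or_eq_true, Bool.and_eq_true, Bool.not_eq_true', decide_eq_true_eq,
      decide_eq_false_iff_not, Prod.Lex.lt_iff, ofLex_toLex]
    constructor
    · rintro (h | ⟨h1, h2⟩)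
      · exact Or.inl h
      · rcases lt_trichotomy a.1 b.1 with h' | h' | h'
        · exact Or.inl h'
        · exact Or.inr ⟨h', h2⟩
        · exact absurd h' h1
    · rintro (h | ⟨h1, h2⟩)
      · exact Or.inl h
      · exact Or.inr ⟨by rw [h1]; exact lt_irrefl _, h2⟩
  show xs.foldl (fun acc x => PySem.List.insertBy _ x acc) []
      = xs.foldl (fun acc x => PySem.List.insertBy _ x acc) []
  rw [hb]

-- the while loop of Source B: invariant and exit facts
theorem pvWhileB_spec (count : Int) :
    ∀ (rest done : List (Int × String)) (lv rem : Int),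
    (done ++ rest).Pairwise (fun a b => a.1 ≤ b.1) →
    done ≠ [] →
    (∀ a ∈ done, a.1 ≤ lv) →
    (∀ b ∈ rest, lv ≤ b.1) →
    0 ≤ rem →
    (done.map (fun a => lv - a.1)).sum + rem = count →
    ∃ done' rest',
      done ++ rest = done' ++ rest' ∧ done' ≠ [] ∧
      (pvWhileB rest done.length lv rem).1 = done'.length ∧
      (∀ a ∈ done', a.1 ≤ (pvWhileB rest done.length lv rem).2.1) ∧
      0 ≤ (pvWhileB rest done.length lv rem).2.2 ∧
      (done'.map (fun a => (pvWhileB rest done.length lv rem).2.1 - a.1)).sum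
        + (pvWhileB rest done.length lv rem).2.2 = count ∧
      (rest' = [] ∨ ∃ b rest'', rest' = b :: rest'' ∧
        (pvWhileB rest done.length lv rem).2.2
          < (done'.length : Int) * (b.1 - (pvWhileB rest done.length lv rem).2.1)) := by
  intro rest
  induction rest with
  | nil =>
    intro done lv rem _ hdne hdle _ hrem hsum
    exact ⟨done, [], by simp, hdne, rfl, hdle, hrem, hsum, Or.inl rfl⟩
  | cons e rest' IH =>
    intro done lv rem hpw hdne hdle hrle hrem hsum
    by_cases hc : (done.length : Int) * (e.1 - lv) ≤ rem
    · have hstep : pvWhileB (e :: rest') done.length lv rem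
          = pvWhileB rest' (done.length + 1) e.1 (rem - (done.length : Int) * (e.1 - lv)) := by
        simp only [pvWhileB]
        rw [if_pos hc]
      have hlen : done.length + 1 = (done ++ [e]).length := by simp
      have hpw' : ((done ++ [e]) ++ rest').Pairwise (fun a b => a.1 ≤ b.1) := by
        simpa using hpw
      have hlve : lv ≤ e.1 := hrle e (by simp)
      have hdle' : ∀ a ∈ done ++ [e], a.1 ≤ e.1 := by
        intro a ha
        rcases List.mem_append.mp ha with h | h
        · exact le_trans (hdle a h) hlve
        · rw [List.mem_singleton.mp h]
      have hrle' : ∀ b ∈ rest', e.1 ≤ b.1 := by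
        intro b hb
        have h := List.pairwise_append.mp hpw
        exact (List.pairwise_cons.mp h.2.1).1 b hb
      have hrem' : 0 ≤ rem - (done.length : Int) * (e.1 - lv) := by omega
      have hsum' : ((done ++ [e]).map (fun a => e.1 - a.1)).sum
          + (rem - (done.length : Int) * (e.1 - lv)) = count := by
        rw [List.map_append, List.sum_append]
        have h1 : (done.map (fun a => e.1 - a.1)).sum
            = (done.map (fun a => lv - a.1)).sum + (done.length : Int) * (e.1 - lv) := by
          rw [show (fun a : Int × String => e.1 - a.1) = (fun a : Int × String => (lv - a.1) + (e.1 - lv)) by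
              funext a; ring]
          rw [PySem.List.sum_map_add_int, PySem.List.sum_map_const_int]
        simp only [List.map_cons, List.map_nil, List.sum_cons, List.sum_nil]
        rw [h1]
        omega
      obtain ⟨d', r', heq, hne', hres, hle', hrem'', hsum'', hexit⟩ :=
        IH (done ++ [e]) e.1 (rem - (done.length : Int) * (e.1 - lv)) hpw' (by simp) hdle' hrle' hrem' hsum'
      rw [hstep, hlen]
      refine ⟨d', r', ?_, hne', hres, hle', hrem'', hsum'', hexit⟩
      rw [List.append_assoc] at heq
      simpa using heq
    · have hstep : pvWhileB (e :: rest') done.length lv rem = (done.length, lv, rem) := by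
        simp only [pvWhileB]
        rw [if_neg hc]
      rw [hstep]
      exact ⟨done, e :: rest', rfl, hdne, rfl, hdle, hrem, hsum,
        Or.inr ⟨e, rest', rfl, by dsimp only; omega⟩⟩

-- Source B's final patch loop, as a map over the dict's items
theorem pvFoldPatchB (s : String) (level : Int) (extra : PySem.Set String)
    (A : String → Int) :
    ∀ (todo : List (Int × String)) (d : PySem.Dict String (PySem.Dict String Int)),
    d.keys.Nodup →
    (todo.map (fun q => q.2)).Nodup →
    (∀ q ∈ todo, d.contains q.2 = true) →
    (∀ q ∈ todo, A q.2 = level - q.1 + (if PySem.Set.contains extra q.2 then 1 else 0)) →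
    (todo.foldl (pvPatchB s level extra) d).items
      = d.items.map (fun p => if p.1 ∈ todo.map (fun q => q.2) ∧ A p.1 ≠ 0
          then (p.1, p.2.insert s (p.2.getD s 0 + A p.1)) else p) := by
  intro todo
  induction todo with
  | nil =>
    intro d _ _ _ _
    simp only [List.foldl_nil, List.map_nil, List.not_mem_nil, false_and, if_false]
    simp
  | cons q todo' IH =>
    intro d hnd htd hc hA
    rw [List.foldl_cons]
    have hAq := hA q (by simp)
    have hqc := hc q (by simp)
    rw [List.map_cons, List.nodup_cons] at htd
    by_cases hadd : level - q.1 + (if PySem.Set.contains extra q.2 then 1 else 0) = 0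
    · have hbody : pvPatchB s level extra d q = d := by
        simp only [pvPatchB]
        rw [if_neg (not_not_intro hadd)]
      rw [hbody, IH d hnd htd.2 (fun q' hq' => hc q' (by simp [hq'])) (fun q' hq' => hA q' (by simp [hq']))]
      apply List.map_congr_left
      intro p _
      by_cases hcnd : p.1 ∈ todo'.map (fun q => q.2) ∧ A p.1 ≠ 0
      · rw [if_pos hcnd, if_pos ⟨by simp [hcnd.1], hcnd.2⟩]
      · rw [if_neg hcnd]
        rw [if_neg ?_]
        intro ⟨h1, h2⟩
        apply hcnd
        refine ⟨?_, h2⟩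
        rw [List.map_cons] at h1
        rcases List.mem_cons.mp h1 with h' | h'
        · exfalso; apply h2; rw [h', hAq]; exact hadd
        · exact h'
    · have hsome : (d.get? q.2).isSome = true := by
        rw [← PySem.Dict.contains_eq_isSome_get?]; exact hqc
      obtain ⟨v, hv⟩ := Option.isSome_iff_exists.mp hsome
      have hbody : pvPatchB s level extra d q
          = d.insert q.2 (v.insert s (v.getD s 0 + (level - q.1 + (if PySem.Set.contains extra q.2 then 1 else 0)))) := by
        simp only [pvPatchB]
        rw [if_pos hadd, hv]
      rw [hbody]
      set w := v.insert s (v.getD s 0 + (level - q.1 + (if PySem.Set.contains extra q.2 then 1 else 0))) with hw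
      have hnd' : (d.insert q.2 w).keys.Nodup := PySem.Dict.nodup_keys_insert d q.2 w hnd
      have hc' : ∀ q' ∈ todo', (d.insert q.2 w).contains q'.2 = true := by
        intro q' hq'
        rw [PySem.Dict.contains_insert, hc q' (by simp [hq'])]
        simp
      rw [IH (d.insert q.2 w) hnd' htd.2 hc' (fun q' hq' => hA q' (by simp [hq']))]
      rw [PySem.Dict.items_insert_of_contains d w hqc, List.map_map]
      apply List.map_congr_left
      intro p hp
      simp only [Function.comp_apply]
      by_cases hk : p.1 = q.2
      · have hpv : p.2 = v := by
          have hp' : (p.1, p.2) ∈ d.items := hp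
          have hg := PySem.Dict.get?_of_mem_items (d := d) hp' hnd
          rw [hk, hv] at hg
          exact (Option.some_injective _ hg).symm
        have h1 : (if (p.1 == q.2) = true then (q.2, w) else p) = (q.2, w) :=
          if_pos (beq_iff_eq.mpr hk)
        rw [h1]
        rw [show (if (q.2, w).1 ∈ todo'.map (fun q => q.2) ∧ A (q.2, w).1 ≠ 0
            then ((q.2, w).1, (q.2, w).2.insert s ((q.2, w).2.getD s 0 + A (q.2, w).1)) else (q.2, w)) = (q.2, w) from
          if_neg (fun hcnd => htd.1 hcnd.1)]
        rw [show (if p.1 ∈ (q :: todo').map (fun q => q.2) ∧ A p.1 ≠ 0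
            then (p.1, p.2.insert s (p.2.getD s 0 + A p.1)) else p) = (p.1, p.2.insert s (p.2.getD s 0 + A p.1)) from
          if_pos ⟨by rw [List.map_cons, hk]; exact List.mem_cons_self, by rw [hk, hAq]; exact hadd⟩]
        rw [hk, hpv, hAq]
      · have h1 : (if (p.1 == q.2) = true then (q.2, w) else p) = p := by
          rw [if_neg]
          simp [hk]
        rw [h1]
        by_cases hcnd : p.1 ∈ todo'.map (fun q => q.2) ∧ A p.1 ≠ 0
        · rw [if_pos hcnd]
          rw [show (if p.1 ∈ (q :: todo').map (fun q => q.2) ∧ A p.1 ≠ 0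
              then (p.1, p.2.insert s (p.2.getD s 0 + A p.1)) else p) = (p.1, p.2.insert s (p.2.getD s 0 + A p.1)) from
            if_pos ⟨by rw [List.map_cons]; exact List.mem_cons_of_mem _ hcnd.1, hcnd.2⟩]
        · rw [if_neg hcnd]
          rw [show (if p.1 ∈ (q :: todo').map (fun q => q.2) ∧ A p.1 ≠ 0
              then (p.1, p.2.insert s (p.2.getD s 0 + A p.1)) else p) = p from
            if_neg (fun hc2 => hcnd ⟨by
              have h1' := hc2.1
              rw [List.map_cons] at h1'
              rcases List.mem_cons.mp h1' with h' | h'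
              · exact absurd h' hk
              · exact h', hc2.2⟩)]

-- ===== VERDICT (by name: the statement is the Claim_ definition above) =====
theorem update_spec : Claim_equal_update := by
  unfold Claim_equal_update
  intro config s count _ hpre
  unfold Spec_update update update_alt
  by_cases hcnt : count > 0
  · have hcfg : config ≠ [] := by
      rcases hpre with h | h
      · exact h
      · omega
    have HK : ((pvToDict config).items.map Prod.fst).Nodup := PySem.Dict.nodup_keys_ofList _
    have HV : ∀ p ∈ (pvToDict config).items, p.2.keys.Nodup := by
      intro p hp
      rcases pvMemUpdate (config.map (fun q => (q.1, PySem.Dict.ofList q.2))) PySem.Dict.empty p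
        (show p ∈ (PySem.Dict.empty.update (config.map (fun q => (q.1, PySem.Dict.ofList q.2)))).items from hp) with h | h
      · exact absurd h (List.not_mem_nil)
      · obtain ⟨q, hq, hq2⟩ := List.mem_map.mp h
        rw [← hq2]
        exact PySem.Dict.nodup_keys_ofList q.2
    have hMne : (pvToDict config).items ≠ [] := by
      obtain ⟨c0, rest, hc⟩ := List.exists_cons_of_ne_nil hcfg
      intro hnil
      have hkeys : (pvToDict config).keys
          = PySem.Set.ofList ((config.map (fun p => (p.1, PySem.Dict.ofList p.2))).map (fun p => p.1)) := by
        have h1 := PySem.Dict.keys_foldl_insert_key (ν := PySem.Dict String Int)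
          (config.map (fun p => (p.1, PySem.Dict.ofList p.2))) (fun p => p.1) (fun _ p => p.2)
          PySem.Dict.empty
        refine Eq.trans ?_ (Eq.trans h1 ?_)
        · rfl
        · rw [show (PySem.Dict.empty : PySem.Dict String (PySem.Dict String Int)).keys = [] from rfl]
          exact PySem.Set.update_nil_left _
      have hmem : c0.1 ∈ (pvToDict config).keys := by
        rw [hkeys]
        apply (PySem.Set.mem_ofList _ _).mpr
        exact List.mem_map.mpr ⟨(c0.1, PySem.Dict.ofList c0.2),
          List.mem_map.mpr ⟨c0, by rw [hc]; simp, rfl⟩, rfl⟩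
      rw [show (pvToDict config).keys = (pvToDict config).items.map (fun p => p.1) from rfl, hnil] at hmem
      exact absurd hmem (List.not_mem_nil)
    -- A's loop is the iterate of pvStepA
    rw [pvFoldlConst, PySem.List.length_pyRange_one, show count - 0 = count by ring]
    have hA := qIterA s (pvToDict config).items HK HV hMne count.toNat
    rw [show PySem.Dict.mk (pvToDict config).items = pvToDict config from rfl] at hA
    rw [hA]
    -- B's branch
    simp only [if_pos hcnt]
    rw [pvSorted2_eq_sorted]
    set M := (pvToDict config).items with hMdef
    set P := M.map (fun p => (p.1, pvSumVals p.2)) with hPdef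
    have hPK : (P.map Prod.fst).Nodup := by
      rw [hPdef, List.map_map]
      exact HK
    have hPne : P ≠ [] := by
      rw [hPdef]
      intro h
      exact hMne (List.map_eq_nil_iff.mp h)
    have hE0 : M.map (fun p => (pvSumVals p.2, p.1)) = P.map (fun q => (q.2, q.1)) := by
      rw [hPdef, List.map_map]
      rfl
    set E := PySem.List.sorted (M.map (fun p => (pvSumVals p.2, p.1))) (fun q => toLex (q.1, q.2)) with hEdef
    have hEperm : E.Perm (P.map (fun q => (q.2, q.1))) := by
      rw [hEdef, ← hE0]
      exact PySem.List.sorted_perm _ _ _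
    have hEne : E ≠ [] := by
      rw [hEdef]
      intro h
      rw [PySem.List.sorted_eq_nil_iff] at h
      rw [hE0] at h
      exact hPne (List.map_eq_nil_iff.mp h)
    have hEpw : E.Pairwise (fun a b => a.1 ≤ b.1) := by
      have h := PySem.List.sorted_pairwise (M.map (fun p => (pvSumVals p.2, p.1)))
        (fun q => toLex (q.1, q.2))
      rw [← hEdef] at h
      apply h.imp
      intro a b hab
      rw [Prod.Lex.le_iff] at hab
      simp only [ofLex_toLex] at hab
      rcases hab with h' | ⟨h', _⟩
      · exact le_of_lt h'
      · exact le_of_eq h'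
    obtain ⟨e0, tl, hE⟩ := List.exists_cons_of_ne_nil hEne
    rw [hE]
    show _ = List.map (fun p => (p.1, p.2.items))
      (List.foldl
        (pvPatchB s
          ((pvWhileB tl 1 e0.1 count).2.1 +
            PySem.Int.floordiv (pvWhileB tl 1 e0.1 count).2.2 ((pvWhileB tl 1 e0.1 count).1 : Int))
          (PySem.Set.ofList
            (PySem.List.slice
              (PySem.List.sorted ((List.take (pvWhileB tl 1 e0.1 count).1 (e0 :: tl)).map (fun q => q.2))
                (fun k => k))
              none (some (PySem.Int.mod (pvWhileB tl 1 e0.1 count).2.2 ((pvWhileB tl 1 e0.1 count).1 : Int))))))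
        (pvToDict config) (List.take (pvWhileB tl 1 e0.1 count).1 (e0 :: tl))).items
    have hEpwc : (e0 :: tl).Pairwise (fun a b => a.1 ≤ b.1) := by rw [← hE]; exact hEpw
    obtain ⟨done', rest', hsplit, hdne', hilen, hlvle, hrem2, hsum2, hexit⟩ :=
      pvWhileB_spec count tl [e0] e0.1 count (by simpa using hEpwc) (by simp)
        (by intro a ha; rw [List.mem_singleton.mp ha])
        (by intro b hb; exact (List.pairwise_cons.mp hEpwc).1 b hb)
        (by omega) (by simp)
    have hWe : pvWhileB tl [e0].length e0.1 count = pvWhileB tl 1 e0.1 count := rfl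
    rw [hWe] at hilen hlvle hrem2 hsum2 hexit
    set W := pvWhileB tl 1 e0.1 count with hWdef
    set iN := W.1 with hiNdef
    set lv2 := W.2.1 with hlv2def
    set rem2 := W.2.2 with hrem2def
    set Lf := lv2 + PySem.Int.floordiv rem2 (iN : Int) with hLfdef
    set rf := PySem.Int.mod rem2 (iN : Int) with hrfdef
    have hiN : iN = done'.length := hilen
    have hipos : 0 < iN := by
      rw [hiN]
      exact List.length_pos_of_ne_nil hdne'
    have hipos' : (0 : Int) < (iN : Int) := by exact_mod_cast hipos
    have hfd0 : 0 ≤ PySem.Int.floordiv rem2 (iN : Int) := by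
      rw [PySem.Int.le_floordiv_iff_mul_le hipos']
      omega
    have hlvLf : lv2 ≤ Lf := by rw [hLfdef]; omega
    have hdLf : ∀ a ∈ done', a.1 ≤ Lf := fun a ha => le_trans (hlvle a ha) hlvLf
    have hEsplit : e0 :: tl = done' ++ rest' := by simpa using hsplit
    have hrest' : ∀ b ∈ rest', Lf < b.1 := by
      rcases hexit with h | ⟨b0, rest'', hr0, hlt⟩
      · intro b hb; rw [h] at hb; cases hb
      · intro b hb
        have hfd : PySem.Int.floordiv rem2 (iN : Int) < b0.1 - lv2 := by
          rw [PySem.Int.floordiv_lt_iff_lt_mul hipos']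
          rw [hiN]
          calc rem2 < (done'.length : Int) * (b0.1 - lv2) := hlt
            _ = (b0.1 - lv2) * (done'.length : Int) := by ring
        have hb0b : b0.1 ≤ b.1 := by
          have hpw2 : rest'.Pairwise (fun a b => a.1 ≤ b.1) := by
            rw [hEsplit] at hEpwc
            exact (List.pairwise_append.mp hEpwc).2.1
          rw [hr0] at hpw2 hb
          rcases List.mem_cons.mp hb with h' | h'
          · rw [h']
          · exact (List.pairwise_cons.mp hpw2).1 b h'
        rw [hLfdef]
        omega
    have hrf0 : 0 ≤ rf := PySem.Int.mod_nonneg _ hipos'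
    have hrflt : rf < (iN : Int) := PySem.Int.mod_lt _ hipos'
    have hfdmul : PySem.Int.floordiv rem2 (iN : Int) * (iN : Int) + rf = rem2 :=
      PySem.Int.floordiv_mul_add_mod _ _
    have hfilter : (e0 :: tl).filter (fun e => decide (e.1 ≤ Lf)) = done' := by
      rw [hEsplit, List.filter_append]
      rw [List.filter_eq_self.mpr (fun a ha => by simpa using hdLf a ha)]
      rw [List.filter_eq_nil_iff.mpr (fun b hb => by simpa using not_le_of_gt (hrest' b hb))]
      simp
    have hEperm' : (e0 :: tl).Perm (P.map (fun q => (q.2, q.1))) := by rw [← hE]; exact hEperm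
    have hqm : qmP P Lf = iN := by
      unfold qmP
      rw [← List.countP_eq_length_filter]
      have h1 : List.countP (fun e => decide (e.1 ≤ Lf)) (P.map (fun q => (q.2, q.1)))
          = List.countP (fun q => decide (q.2 ≤ Lf)) P := by
        rw [List.countP_map]
        rfl
      rw [← h1, ← hEperm'.countP_eq (fun e => decide (e.1 ≤ Lf))]
      rw [List.countP_eq_length_filter, hfilter, hiN]
    have hqn : qNeed P Lf = count - rf := by
      unfold qNeed
      have h1 : (P.map (fun q => (q.2, q.1))).map (fun e => max 0 (Lf - e.1))
          = P.map (fun q => max 0 (Lf - q.2)) := by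
        rw [List.map_map]
        rfl
      rw [← h1, ← (hEperm'.map (fun e => max 0 (Lf - e.1))).sum_eq]
      rw [hEsplit, List.map_append, List.sum_append]
      have hd : done'.map (fun e => max 0 (Lf - e.1))
          = done'.map (fun e => (lv2 - e.1) + PySem.Int.floordiv rem2 (iN : Int)) :=
        List.map_congr_left (fun a ha => by
          have h2 := hdLf a ha
          have h3 := hlvle a ha
          rw [hLfdef]
          omega)
      have hr : (rest'.map (fun e => max 0 (Lf - e.1))).sum = 0 :=
        List.sum_eq_zero (fun x hx => by
          obtain ⟨b, hb, hbv⟩ := List.mem_map.mp hx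
          have := hrest' b hb
          omega)
      rw [hd, PySem.List.sum_map_add_int, PySem.List.sum_map_const_int, hr, ← hiN]
      have hfd2 : (iN : Int) * PySem.Int.floordiv rem2 (iN : Int) = rem2 - rf := by
        rw [mul_comm]
        omega
      omega
    have hcount : ((count.toNat : Int)) = count := Int.toNat_of_nonneg (by omega)
    have hspec := qLR_spec P hPne count.toNat
    have hrfn : (rf.toNat : Int) = rf := Int.toNat_of_nonneg hrf0
    obtain ⟨hLeq, hreq⟩ := qUniq P Lf (qLR P count.toNat).1 rf.toNat (qLR P count.toNat).2
      (by rw [hqm]; omega) hspec.1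
      (by rw [hqn, hrfn, hspec.2, hcount]; ring)
    -- the processed prefix of the sorted entries and the extra-instance key set
    have htake : List.take W.1 (e0 :: tl) = done' := by
      rw [hEsplit, show W.1 = done'.length from hiN]
      exact List.take_left
    have hkeysperm : (done'.map (fun q => q.2)).Perm
        ((P.filter (fun q => decide (q.2 ≤ Lf))).map Prod.fst) := by
      rw [← hfilter]
      have h2 := hEperm'.filter (fun e => decide (e.1 ≤ Lf))
      have h3 : (P.map (fun q => (q.2, q.1))).filter (fun e => decide (e.1 ≤ Lf))
          = (P.filter (fun q => decide (q.2 ≤ Lf))).map (fun q => (q.2, q.1)) := by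
        rw [List.filter_map]
        rfl
      rw [h3] at h2
      have h4 := h2.map (fun q => q.2)
      rw [List.map_map] at h4
      exact h4
    have hsorted : PySem.List.sorted (done'.map (fun q => q.2)) (fun k => k) = qSK P Lf := by
      unfold qSK
      exact PySem.List.sorted_eq_sorted_of_perm _ _ _ (fun a b h => h) hkeysperm
    have hex : PySem.Set.ofList (PySem.List.slice
          (PySem.List.sorted ((List.take W.1 (e0 :: tl)).map (fun q => q.2)) (fun k => k))
          none (some rf))
        = (qSK P Lf).take rf.toNat := by
      rw [htake, hsorted, PySem.List.slice_to _ hrf0]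
      exact PySem.Set.ofList_eq_self_of_nodup _
        ((qSK_nodup P Lf hPK).sublist (List.take_sublist _ _))
    -- membership bookkeeping between done', the entry list and P
    have hmemP : ∀ q ∈ done', (q.2, q.1) ∈ P := by
      intro q hq
      obtain ⟨p, hp, hpe⟩ := List.mem_map.mp ((hEperm'.mem_iff).mp
        (by rw [hEsplit]; exact List.mem_append_left _ hq))
      rw [← hpe]
      exact hp
    have hdk : (done'.map (fun q => q.2)).Nodup := by
      apply hkeysperm.nodup_iff.mpr
      exact hPK.sublist (List.Sublist.map Prod.fst List.filter_sublist)
    have hkeysNodup : (pvToDict config).keys.Nodup := HK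
    have hdc : ∀ q ∈ done', (pvToDict config).contains q.2 = true := by
      intro q hq
      obtain ⟨p, hpM, hpe⟩ := List.mem_map.mp (hmemP q hq)
      exact (PySem.Dict.contains_iff_mem_keys _ _).mpr
        (List.mem_map.mpr ⟨p, hpM, congrArg Prod.fst hpe⟩)
    have hAfn : ∀ q ∈ done', qW P Lf rf.toNat q.2
        = Lf - q.1 + (if PySem.Set.contains ((qSK P Lf).take rf.toNat) q.2 then 1 else 0) := by
      intro q hq
      have hv := qW_val P hPK Lf rf.toNat (q.2, q.1) (hmemP q hq)
      dsimp only at hv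
      rw [hv, if_pos (hdLf q hq)]
      by_cases hm : q.2 ∈ (qSK P Lf).take rf.toNat
      · rw [if_pos hm, if_pos ((PySem.Set.contains_iff _ _).mpr hm)]
      · rw [if_neg hm, if_neg (fun h => hm ((PySem.Set.contains_iff _ _).mp h))]
    rw [hex, htake]
    have hfold := pvFoldPatchB s Lf ((qSK P Lf).take rf.toNat) (qW P Lf rf.toNat)
      done' (pvToDict config) hkeysNodup hdk hdc hAfn
    refine congrArg (List.map (fun p : String × PySem.Dict String Int => (p.1, p.2.items))) ?_
    rw [← hLeq, ← hreq, hfold]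
    show M.map (fun p => (p.1, pvPatch s p.2 (qW P Lf rf.toNat p.1)))
      = M.map (fun p => if p.1 ∈ done'.map (fun q => q.2) ∧ qW P Lf rf.toNat p.1 ≠ 0
          then (p.1, p.2.insert s (p.2.getD s 0 + qW P Lf rf.toNat p.1)) else p)
    apply List.map_congr_left
    intro p hp
    have hqP : (p.1, pvSumVals p.2) ∈ P := List.mem_map.mpr ⟨p, hp, rfl⟩
    have hv := qW_val P hPK Lf rf.toNat (p.1, pvSumVals p.2) hqP
    dsimp only at hv
    by_cases hle : pvSumVals p.2 ≤ Lf
    · have hmemE : (pvSumVals p.2, p.1) ∈ e0 :: tl :=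
        hEperm'.mem_iff.mpr (List.mem_map.mpr ⟨(p.1, pvSumVals p.2), hqP, rfl⟩)
      have hmemD : (pvSumVals p.2, p.1) ∈ done' := by
        rw [← hfilter]
        exact List.mem_filter.mpr ⟨hmemE, by simpa using hle⟩
      have hkey : p.1 ∈ done'.map (fun q => q.2) := List.mem_map.mpr ⟨_, hmemD, rfl⟩
      by_cases hw : qW P Lf rf.toNat p.1 = 0
      · rw [if_neg (fun hc2 => hc2.2 hw), hw]
        show (p.1, pvPatch s p.2 0) = p
        rw [show pvPatch s p.2 0 = p.2 by simp [pvPatch]]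
      · rw [if_pos ⟨hkey, hw⟩]
        show (p.1, pvPatch s p.2 (qW P Lf rf.toNat p.1)) = _
        rw [show pvPatch s p.2 (qW P Lf rf.toNat p.1)
            = p.2.insert s (p.2.getD s 0 + qW P Lf rf.toNat p.1) by
          simp only [pvPatch]
          rw [if_neg hw]]
    · have hw : qW P Lf rf.toNat p.1 = 0 := by rw [hv, if_neg hle]
      rw [if_neg (fun hc2 => hc2.2 hw), hw]
      show (p.1, pvPatch s p.2 0) = p
      rw [show pvPatch s p.2 0 = p.2 by simp [pvPatch]]
  · rw [PySem.List.pyRange_one_eq_nil (by omega)]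
    simp only [List.foldl_nil, if_neg hcnt]
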